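-- pv_equiv track=rewrite | github.com/sakib1486/AOC-2025 | Day10/part1.py | solve_machine
-- ===== SOURCE A (Python) =====
-- from itertools import product
--
-- def solve_machine(target, buttons):
--     n = len(target)
--     m = len(buttons)
--
--     # Build matrix A (n x m, bits)
--     A = [[0] * m for _ in range(n)]
--     for j, btn in enumerate(buttons):
--         for i in btn:
--             A[i][j] = 1
--
--     # Gaussian elimination over GF(2)
--     row = 0
--     pivots = [-1] * n
--     for col in range(m):
--         pivot = None
--         for r in range(row, n):
--             if A[r][col] == 1:
--                 pivot = r
--                 break
--         if pivot is None:
--             continue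
--
--         # swap row and pivot
--         A[row], A[pivot] = A[pivot], A[row]
--         target[row], target[pivot] = target[pivot], target[row]
--         pivots[row] = col
--
--         # eliminate
--         for r in range(n):
--             if r != row and A[r][col] == 1:
--                 for c in range(col, m):
--                     A[r][c] ^= A[row][c]
--                 target[r] ^= target[row]
--         row += 1
--
--     # find free vars
--     pivot_cols = set(p for p in pivots if p != -1)
--     free = [c for c in range(m) if c not in pivot_cols]
--
--     best = None
--
--     # brute all free var combinations
--     for free_choice in product([0,1], repeat=len(free)):
--         x = [0]*m
--         for c, val in zip(free, free_choice):
--             x[c] = val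
--
--         # back substitute
--         for r in reversed(range(n)):
--             pc = pivots[r]
--             if pc == -1:
--                 if target[r] != 0:
--                     break
--                 continue
--             s = target[r]
--             for c in range(pc+1, m):
--                 s ^= (A[r][c] & x[c])
--             x[pc] = s
--         else:
--             # valid solution
--             presses = sum(x)
--             if best is None or presses < best:
--                 best = presses
--
--     return best
-- ===== SOURCE B (Python) =====
-- def solve_machine(target, buttons):
--     n = len(target)
--     m = len(buttons)
--
--     # Build matrix A (n x m, bits) and run the same in-place Gaussian
--     # elimination over GF(2) as before (target is mutated identically).
--     A = [[0] * m for _ in range(n)]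
--     for j, btn in enumerate(buttons):
--         for i in btn:
--             A[i][j] = 1
--
--     row = 0
--     pivots = [-1] * n
--     for col in range(m):
--         pivot = None
--         for r in range(row, n):
--             if A[r][col] == 1:
--                 pivot = r
--                 break
--         if pivot is None:
--             continue
--         A[row], A[pivot] = A[pivot], A[row]
--         target[row], target[pivot] = target[pivot], target[row]
--         pivots[row] = col
--         for r in range(n):
--             if r != row and A[r][col] == 1:
--                 for c in range(col, m):
--                     A[r][c] ^= A[row][c]
--                 target[r] ^= target[row]
--         row += 1
--
--     # Inconsistent system: a zero row demands a non-zero target value.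
--     for r in range(n):
--         if pivots[r] == -1 and target[r] != 0:
--             return None
--
--     pivot_cols = set(p for p in pivots if p != -1)
--     free = [c for c in range(m) if c not in pivot_cols]
--     f = len(free)
--
--     def back_sub(rhs, free_vals):
--         x = [0] * m
--         for c, v in zip(free, free_vals):
--             x[c] = v
--         for r in reversed(range(n)):
--             pc = pivots[r]
--             if pc == -1:
--                 continue
--             s = rhs[r]
--             for c in range(pc + 1, m):
--                 s ^= A[r][c] & x[c]
--             x[pc] = s
--         return x
--
--     # One particular solution (all free vars 0) and one null-space basis
--     # vector per free variable; every solution is x0 xor a subset of basis.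
--     x0 = back_sub(target, [0] * f)
--     zeros = [0] * n
--     basis = [back_sub(zeros, [1 if i == k else 0 for i in range(f)]) for k in range(f)]
--
--     best = None
--     for mask in range(1 << f):
--         x = x0
--         for k in range(f):
--             if (mask >> (f - 1 - k)) & 1:
--                 x = [a ^ b for a, b in zip(x, basis[k])]
--         presses = sum(x)
--         if best is None or presses < best:
--             best = presses
--     return best
-- ===== Notes on version B (the rewrite author's own statement) =====
-- stated objective: faster
-- what changed: After the (unchanged, in-place) GF(2) Gaussian elimination, B no longer runs a full back-substitution for each of the 2^f free-variable choices: it back-substitutes once for a particular solution x0 and once per free column for a null-space basis vector, checks consistency once up front, and then enumerates the 2^f subsets of the basis by integer mask, XOR-combining precomputed vectors onto x0 and tracking the minimum sum.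
import Mathlib
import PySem

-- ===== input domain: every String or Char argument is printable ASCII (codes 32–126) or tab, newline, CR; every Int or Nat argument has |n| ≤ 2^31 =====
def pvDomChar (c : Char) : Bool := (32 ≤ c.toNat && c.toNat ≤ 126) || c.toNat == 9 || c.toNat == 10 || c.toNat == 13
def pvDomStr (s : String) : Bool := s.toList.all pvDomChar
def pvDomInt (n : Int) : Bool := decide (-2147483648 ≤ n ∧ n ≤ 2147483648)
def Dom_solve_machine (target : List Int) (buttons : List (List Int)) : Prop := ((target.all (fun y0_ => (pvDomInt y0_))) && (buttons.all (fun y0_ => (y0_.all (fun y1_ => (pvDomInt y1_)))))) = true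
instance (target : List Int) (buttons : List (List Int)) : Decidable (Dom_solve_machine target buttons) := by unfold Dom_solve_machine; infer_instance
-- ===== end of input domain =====

-- B keeps A's in-place GF(2) elimination (so the observable mutation of `target` is identical)
-- but replaces the per-choice back-substitution by one particular solution + a null-space basis,
-- enumerated by subset masks; objective: faster (per-choice work drops to a few vector xors).

-- ===== PORT A =====
-- helpers shared by both ports (the elimination half of Source B is verbatim A's code)
def pvGetE (xs : List Int) (i : Nat) : Int := xs.getD i 0
def pvRow (M : List (List Int)) (i : Nat) : List Int := M.getD i []

-- `A[i][j] = 1` with Python's negative-index wraparound (IndexError cases are outside Pre_)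
def pvSetBit (n : Nat) (M : List (List Int)) (i : Int) (j : Nat) : List (List Int) :=
  let i' := (if i < 0 then i + (n : Int) else i).toNat
  M.set i' ((pvRow M i').set j 1)

def pvBuild (n m : Nat) (buttons : List (List Int)) : List (List Int) :=
  (buttons.zipIdx).foldl (fun M bj => bj.1.foldl (fun M i => pvSetBit n M i bj.2) M)
    (List.replicate n (List.replicate m 0))

-- inner `for c in range(col, m): A[r][c] ^= A[row][c]`
def pvXorRow (dst src : List Int) (col m : Nat) : List Int :=
  (List.range' col (m - col)).foldl
    (fun d c => d.set c (PySem.Int.bxor (pvGetE d c) (pvGetE src c))) dst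

-- one `col` iteration of the Gaussian elimination loop; state = (A, target, row, pivots)
def pvElimStep (n m : Nat) (st : List (List Int) × List Int × Nat × List Int) (col : Nat) :
    List (List Int) × List Int × Nat × List Int :=
  let (M, t, row, piv) := st
  match (List.range' row (n - row)).find? (fun r => pvGetE (pvRow M r) col == 1) with
  | none => (M, t, row, piv)
  | some p =>
    let M1 := (M.set row (pvRow M p)).set p (pvRow M row)
    let t1 := (t.set row (pvGetE t p)).set p (pvGetE t row)
    let piv1 := piv.set row (col : Int)
    let Mt2 := (List.range n).foldl (fun (Mt : List (List Int) × List Int) r =>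
        if r ≠ row ∧ pvGetE (pvRow Mt.1 r) col == 1 then
          (Mt.1.set r (pvXorRow (pvRow Mt.1 r) (pvRow Mt.1 row) col m),
           Mt.2.set r (PySem.Int.bxor (pvGetE Mt.2 r) (pvGetE Mt.2 row)))
        else Mt) (M1, t1)
    (Mt2.1, Mt2.2, row + 1, piv1)

def pvGauss (n m : Nat) (A0 : List (List Int)) (t0 : List Int) :
    List (List Int) × List Int × Nat × List Int :=
  (List.range m).foldl (pvElimStep n m) (A0, t0, 0, List.replicate n (-1))

-- `pivot_cols = set(...)`; membership in that set = membership in the filtered list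
def pvFree (m : Nat) (piv : List Int) : List Nat :=
  let pivotCols := piv.filter (fun p => !(p == -1))
  (List.range m).filter (fun c => !(pivotCols.contains (c : Int)))

-- `x = [0]*m; for c, val in zip(free, vals): x[c] = val`
def pvXInit (m : Nat) (free : List Nat) (vals : List Int) : List Int :=
  (free.zip vals).foldl (fun x cv => x.set cv.1 cv.2) (List.replicate m 0)

-- `if best is None or presses < best: best = presses` (identical in both Pythons)
def pvMin (best : Option Int) (p : Int) : Option Int :=
  match best with
  | none => some p
  | some b => if p < b then some p else some b

-- itertools.product([0,1], repeat=k), in product's order (first coordinate slowest)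
def pvProd : Nat → List (List Int)
  | 0 => [[]]
  | k+1 => (pvProd k).map (fun t => 0 :: t) ++ (pvProd k).map (fun t => 1 :: t)

-- A's back substitution: `for r in reversed(range(n))` with the for-else/break;
-- one row iteration (break = none, which is absorbing):
def pvAStep (m : Nat) (M : List (List Int)) (t piv : List Int)
    (ox : Option (List Int)) (r : Nat) : Option (List Int) :=
  match ox with
  | none => none
  | some x =>
    if pvGetE piv r == -1 then (if !(pvGetE t r == 0) then none else some x)
    else
      some (x.set (pvGetE piv r).toNat
        (((List.range' ((pvGetE piv r).toNat + 1) (m - ((pvGetE piv r).toNat + 1))).foldl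
          (fun s c => PySem.Int.bxor s (PySem.Int.band (pvGetE (pvRow M r) c) (pvGetE x c)))
          (pvGetE t r))))

def pvBackA (n m : Nat) (M : List (List Int)) (t piv : List Int) (x : List Int) :
    Option (List Int) :=
  ((List.range n).reverse).foldl (pvAStep m M t piv) (some x)

def solve_machine (target : List Int) (buttons : List (List Int)) : Option Int :=
  let n := target.length
  let m := buttons.length
  match pvGauss n m (pvBuild n m buttons) target with
  | (M, t, _row, piv) =>
    let free := pvFree m piv
    (pvProd free.length).foldl (fun best tu =>
      match pvBackA n m M t piv (pvXInit m free tu) with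
      | none => best
      | some x => pvMin best (x.foldl (·+·) 0)) none

-- ===== PORT B =====
def pvZipXor (x y : List Int) : List Int := List.zipWith PySem.Int.bxor x y

-- one row step of Source B's back_sub (no break: consistency was checked up front)
def pvBStep (m : Nat) (M : List (List Int)) (piv rhs : List Int) (x : List Int) (r : Nat) :
    List Int :=
  if pvGetE piv r == -1 then x
  else
    x.set (pvGetE piv r).toNat
      (((List.range' ((pvGetE piv r).toNat + 1) (m - ((pvGetE piv r).toNat + 1))).foldl
        (fun s c => PySem.Int.bxor s (PySem.Int.band (pvGetE (pvRow M r) c) (pvGetE x c)))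
        (pvGetE rhs r)))

def pvBLoop (n m : Nat) (M : List (List Int)) (piv rhs x : List Int) : List Int :=
  ((List.range n).reverse).foldl (pvBStep m M piv rhs) x

-- Source B's back_sub(rhs, free_vals)
def pvBackSub (n m : Nat) (M : List (List Int)) (piv : List Int) (free : List Nat)
    (rhs vals : List Int) : List Int :=
  pvBLoop n m M piv rhs (pvXInit m free vals)

def solve_machine_alt (target : List Int) (buttons : List (List Int)) : Option Int :=
  let n := target.length
  let m := buttons.length
  match pvGauss n m (pvBuild n m buttons) target with
  | (M, t, _row, piv) =>
    if (List.range n).any (fun r => pvGetE piv r == -1 && !(pvGetE t r == 0)) then none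
    else
      let free := pvFree m piv
      let f := free.length
      let x0 := pvBackSub n m M piv free t (List.replicate f 0)
      let zeros := List.replicate n (0 : Int)
      let basis := (List.range f).map (fun k =>
        pvBackSub n m M piv free zeros ((List.range f).map (fun i => if i = k then (1 : Int) else 0)))
      (List.range (1 <<< f)).foldl (fun best mask =>
        let x := (List.range f).foldl (fun x k =>
          if (mask >>> (f - 1 - k)) &&& 1 == 1 then pvZipXor x (basis.getD k []) else x) x0
        pvMin best (x.foldl (·+·) 0)) none

-- ===== PRECONDITION & SPEC =====
-- Pre_ excludes exactly the inputs where A raises IndexError: a button index outside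
-- [-len(target), len(target)) when building the matrix.
def Pre_solve_machine (target : List Int) (buttons : List (List Int)) : Prop :=
  ∀ btn ∈ buttons, ∀ i ∈ btn, -(target.length : Int) ≤ i ∧ i < (target.length : Int)
instance (target : List Int) (buttons : List (List Int)) : Decidable (Pre_solve_machine target buttons) := by unfold Pre_solve_machine; infer_instance
def pvWitness_solve_machine : List Int × List (List Int) := ([1, 0], [[0], [1]])

def Spec_solve_machine (target : List Int) (buttons : List (List Int)) (out : Option Int) : Prop := out = solve_machine_alt target buttons
instance (target : List Int) (buttons : List (List Int)) (out : Option Int) : Decidable (Spec_solve_machine target buttons out) := by unfold Spec_solve_machine; infer_instance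

-- ===== CLAIM (what is proved, stated in full; the proofs are below) =====
def Claim_equal_solve_machine : Prop := ∀ (target : List Int) (buttons : List (List Int)), Dom_solve_machine target buttons → Pre_solve_machine target buttons → Spec_solve_machine target buttons (solve_machine target buttons)

-- ===== LEMMAS AND PROOFS =====

-- ---- Nat bit algebra ----
theorem pv_nat_xor4 (a b c d : Nat) : (a ^^^ b) ^^^ (c ^^^ d) = (a ^^^ c) ^^^ (b ^^^ d) := by
  apply Nat.eq_of_testBit_eq; intro i
  simp only [Nat.testBit_xor]
  cases a.testBit i <;> cases b.testBit i <;> cases c.testBit i <;> cases d.testBit i <;> rfl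

theorem pv_subxor : ∀ m t : Nat, t &&& m = t → m - t = m ^^^ t := by
  intro m
  induction m using Nat.strong_induction_on with
  | _ m IH =>
    intro t h
    rcases Nat.eq_zero_or_pos m with hm | hm
    · subst hm; simp [Nat.and_zero] at h; simp [← h]
    · have h2 : (t / 2) &&& (m / 2) = t / 2 := by
        apply Nat.eq_of_testBit_eq; intro i
        have hh := congrArg (fun x => x.testBit (i + 1)) h
        simp only [Nat.testBit_and] at hh
        simp [Nat.testBit_div_two, Nat.testBit_and, hh]
      have ht2 : t / 2 ≤ m / 2 := by
        conv_lhs => rw [← h2]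
        exact Nat.and_le_right
      have hIH : m / 2 - t / 2 = m / 2 ^^^ t / 2 := IH (m / 2) (by omega) (t / 2) h2
      have hb : t % 2 ≤ m % 2 := by
        have h0 := congrArg (fun x => x.testBit 0) h
        simp only [Nat.testBit_and, Nat.testBit_zero] at h0
        rcases Nat.mod_two_eq_zero_or_one m with e | e <;>
          rcases Nat.mod_two_eq_zero_or_one t with e' | e' <;> simp [e, e'] at h0 ⊢
      have hXd : (m ^^^ t) / 2 = m / 2 ^^^ t / 2 := by
        apply Nat.eq_of_testBit_eq; intro i
        simp [Nat.testBit_div_two, Nat.testBit_xor]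
      have hX0 : (m ^^^ t) % 2 = m % 2 - t % 2 := by
        have h0 : (m ^^^ t).testBit 0 = ((m.testBit 0) ^^ (t.testBit 0)) := Nat.testBit_xor m t 0
        simp only [Nat.testBit_zero] at h0
        rcases Nat.mod_two_eq_zero_or_one (m ^^^ t) with e | e <;>
          rcases Nat.mod_two_eq_zero_or_one m with e1 | e1 <;>
            rcases Nat.mod_two_eq_zero_or_one t with e2 | e2 <;>
              simp [e, e1, e2] at h0 ⊢ <;> omega
      omega

theorem pv_sub_and (m x : Nat) : m - (m &&& x) = m ^^^ (m &&& x) := by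
  apply pv_subxor
  rw [Nat.and_comm (m &&& x) m, ← Nat.and_assoc, Nat.and_self]

-- ---- PySem.Int.bxor / band on the two integer constructors ----
theorem pv_bxor_pp (m n : Nat) : PySem.Int.bxor (Int.ofNat m) (Int.ofNat n) = Int.ofNat (m ^^^ n) := by
  unfold PySem.Int.bxor
  simp only [Int.ofNat_eq_natCast]
  rw [if_pos (by omega : (0:Int) ≤ (m:Int)), if_pos (by omega : (0:Int) ≤ (n:Int))]
  have h3 : ((m:Int)).toNat = m := by omega
  have h4 : ((n:Int)).toNat = n := by omega
  try rw [h3]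
  try rw [h4]
  try omega

theorem pv_bxor_pn (m n : Nat) : PySem.Int.bxor (Int.ofNat m) (Int.negSucc n) = Int.negSucc (m ^^^ n) := by
  unfold PySem.Int.bxor
  simp only [Int.ofNat_eq_natCast]
  rw [if_pos (by omega : (0:Int) ≤ (m:Int)), if_neg (by omega : ¬ (0:Int) ≤ Int.negSucc n)]
  have h3 : ((m:Int)).toNat = m := by omega
  have h4 : (-(Int.negSucc n) - 1).toNat = n := by omega
  try rw [h3]
  try rw [h4]
  try omega

theorem pv_bxor_np (m n : Nat) : PySem.Int.bxor (Int.negSucc m) (Int.ofNat n) = Int.negSucc (m ^^^ n) := by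
  unfold PySem.Int.bxor
  simp only [Int.ofNat_eq_natCast]
  rw [if_neg (by omega : ¬ (0:Int) ≤ Int.negSucc m), if_pos (by omega : (0:Int) ≤ (n:Int))]
  have h3 : (-(Int.negSucc m) - 1).toNat = m := by omega
  have h4 : ((n:Int)).toNat = n := by omega
  try rw [h3]
  try rw [h4]
  try omega

theorem pv_bxor_nn (m n : Nat) : PySem.Int.bxor (Int.negSucc m) (Int.negSucc n) = Int.ofNat (m ^^^ n) := by
  unfold PySem.Int.bxor
  simp only [Int.ofNat_eq_natCast]
  rw [if_neg (by omega : ¬ (0:Int) ≤ Int.negSucc m), if_neg (by omega : ¬ (0:Int) ≤ Int.negSucc n)]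
  have h3 : (-(Int.negSucc m) - 1).toNat = m := by omega
  have h4 : (-(Int.negSucc n) - 1).toNat = n := by omega
  try rw [h3]
  try rw [h4]
  try omega

theorem pv_band_pp (m n : Nat) : PySem.Int.band (Int.ofNat m) (Int.ofNat n) = Int.ofNat (m &&& n) := by
  unfold PySem.Int.band
  simp only [Int.ofNat_eq_natCast]
  rw [if_pos (by omega : (0:Int) ≤ (m:Int)), if_pos (by omega : (0:Int) ≤ (n:Int))]
  have h3 : ((m:Int)).toNat = m := by omega
  have h4 : ((n:Int)).toNat = n := by omega
  try rw [h3]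
  try rw [h4]
  try omega

theorem pv_band_pn (m n : Nat) : PySem.Int.band (Int.ofNat m) (Int.negSucc n) = Int.ofNat (m - (m &&& n)) := by
  unfold PySem.Int.band
  simp only [Int.ofNat_eq_natCast]
  rw [if_pos (by omega : (0:Int) ≤ (m:Int)), if_neg (by omega : ¬ (0:Int) ≤ Int.negSucc n)]
  have h3 : ((m:Int)).toNat = m := by omega
  have h4 : (-(Int.negSucc n) - 1).toNat = n := by omega
  try rw [h3]
  try rw [h4]
  try omega

theorem pv_band_np (m n : Nat) : PySem.Int.band (Int.negSucc m) (Int.ofNat n) = Int.ofNat (n - (n &&& m)) := by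
  unfold PySem.Int.band
  simp only [Int.ofNat_eq_natCast]
  rw [if_neg (by omega : ¬ (0:Int) ≤ Int.negSucc m), if_pos (by omega : (0:Int) ≤ (n:Int))]
  have h3 : (-(Int.negSucc m) - 1).toNat = m := by omega
  have h4 : ((n:Int)).toNat = n := by omega
  try rw [h3]
  try rw [h4]
  try omega

theorem pv_band_nn (m n : Nat) : PySem.Int.band (Int.negSucc m) (Int.negSucc n) = Int.negSucc (m ||| n) := by
  unfold PySem.Int.band
  rw [if_neg (by omega : ¬ (0:Int) ≤ Int.negSucc m), if_neg (by omega : ¬ (0:Int) ≤ Int.negSucc n)]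
  have h3 : (-(Int.negSucc m) - 1).toNat = m := by omega
  have h4 : (-(Int.negSucc n) - 1).toNat = n := by omega
  try rw [h3]
  try rw [h4]
  try omega

-- ---- Int algebra used by the linearity argument ----
theorem pv_bxor4 (a b c d : Int) :
    PySem.Int.bxor (PySem.Int.bxor a b) (PySem.Int.bxor c d)
      = PySem.Int.bxor (PySem.Int.bxor a c) (PySem.Int.bxor b d) := by
  rcases a with m|m <;> rcases b with n|n <;> rcases c with p|p <;> rcases d with q|q <;>
    simp only [pv_bxor_pp, pv_bxor_pn, pv_bxor_np, pv_bxor_nn] <;>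
      rw [pv_nat_xor4]

theorem pv_band_bxor (a b c : Int) :
    PySem.Int.band a (PySem.Int.bxor b c)
      = PySem.Int.bxor (PySem.Int.band a b) (PySem.Int.band a c) := by
  rcases a with m|m <;> rcases b with n|n <;> rcases c with p|p <;>
    simp only [pv_bxor_pp, pv_bxor_pn, pv_bxor_np, pv_bxor_nn,
      pv_band_pp, pv_band_pn, pv_band_np, pv_band_nn, pv_sub_and] <;>
    · congr 1
      apply Nat.eq_of_testBit_eq; intro i
      simp only [Nat.testBit_xor, Nat.testBit_and, Nat.testBit_or]
      cases m.testBit i <;> cases n.testBit i <;> cases p.testBit i <;> rfl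

-- ---- list basics ----
theorem pv_getE_def (xs : List Int) (i : Nat) : pvGetE xs i = xs[i]?.getD 0 := by
  unfold pvGetE; exact List.getD_eq_getElem?_getD

theorem pv_ext_getE (x y : List Int) (hl : x.length = y.length)
    (h : ∀ i, pvGetE x i = pvGetE y i) : x = y := by
  apply List.ext_getElem hl
  intro i h1 h2
  have := h i
  unfold pvGetE at this
  rwa [List.getD_eq_getElem x 0 h1, List.getD_eq_getElem y 0 h2] at this

theorem pv_getE_set (x : List Int) (i j : Nat) (v : Int) :
    pvGetE (x.set i v) j = if j = i ∧ i < x.length then v else pvGetE x j := by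
  rw [pv_getE_def, pv_getE_def, List.getElem?_set]
  by_cases hij : i = j
  · subst hij
    by_cases hi : i < x.length
    · simp [hi]
    · simp [hi, pv_getE_def]
  · have : ¬ (j = i ∧ i < x.length) := fun hc => hij hc.1.symm
    simp [hij, this]

theorem pv_set_self (x : List Int) (i : Nat) (v : Int) (h : pvGetE x i = v) :
    x.set i v = x := by
  apply pv_ext_getE _ _ (by simp)
  intro j
  rw [pv_getE_set]
  split_ifs with hc
  · rw [← h, hc.1]
  · rfl

theorem pv_getE_replicate (n r : Nat) : pvGetE (List.replicate n (0:Int)) r = 0 := by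
  unfold pvGetE
  by_cases h : r < n
  · rw [List.getD_replicate _ h]
  · rw [List.getD_eq_getElem?_getD, List.getElem?_eq_none (by simp; omega)]; rfl

theorem pv_getE_zip (x y : List Int) (h : x.length = y.length) (c : Nat) :
    pvGetE (pvZipXor x y) c = PySem.Int.bxor (pvGetE x c) (pvGetE y c) := by
  by_cases hc : c < x.length
  · unfold pvZipXor pvGetE
    rw [List.getD_eq_getElem _ _ (by simp [List.length_zipWith, ← h]; omega),
        List.getD_eq_getElem _ _ hc, List.getD_eq_getElem _ _ (h ▸ hc),
        List.getElem_zipWith]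
  · unfold pvZipXor pvGetE
    rw [List.getD_eq_getElem?_getD, List.getElem?_eq_none (by simp [List.length_zipWith]; omega),
        List.getD_eq_getElem?_getD, List.getElem?_eq_none (by omega),
        List.getD_eq_getElem?_getD, List.getElem?_eq_none (by omega)]
    rfl

theorem pv_zip_len (x y : List Int) : (pvZipXor x y).length = min x.length y.length := by
  simp [pvZipXor]

theorem pv_set_zip (x y : List Int) (h : x.length = y.length) (i : Nat) (a b : Int) :
    pvZipXor (x.set i a) (y.set i b) = (pvZipXor x y).set i (PySem.Int.bxor a b) := by
  apply pv_ext_getE _ _ (by simp [pv_zip_len])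
  intro j
  rw [pv_getE_zip _ _ (by simp [h]), pv_getE_set, pv_getE_set, pv_getE_set,
      pv_getE_zip _ _ h]
  have hlz : (pvZipXor x y).length = x.length := by simp [pv_zip_len, h]
  by_cases hc : j = i ∧ i < x.length
  · rw [if_pos hc, if_pos (by omega : j = i ∧ i < y.length), if_pos (by omega : j = i ∧ i < (pvZipXor x y).length)]
  · rw [if_neg hc, if_neg (by omega : ¬ (j = i ∧ i < y.length)), if_neg (by omega : ¬ (j = i ∧ i < (pvZipXor x y).length))]

theorem pv_foldl_congr {α β : Type} (l : List β) (f g : α → β → α) (i : α)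
    (h : ∀ b a, a ∈ l → f b a = g b a) : l.foldl f i = l.foldl g i := by
  induction l generalizing i with
  | nil => rfl
  | cons a l IH => rw [List.foldl_cons, List.foldl_cons, h i a (by simp)]
                   exact IH _ (fun b a ha => h b a (by simp [ha]))

theorem pv_foldl_id {α β : Type} (l : List β) (i : α) : l.foldl (fun b _ => b) i = i := by
  induction l <;> simp_all

-- ---- the fold of sets behind pvXInit ----
theorem pv_foldset_len (ps : List (Nat × Int)) (x : List Int) :
    (ps.foldl (fun x p => x.set p.1 p.2) x).length = x.length := by
  induction ps generalizing x with
  | nil => rfl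
  | cons p ps IH => simp [IH]

theorem pv_foldset_untouched (ps : List (Nat × Int)) (x : List Int) (c : Nat)
    (h : ∀ p ∈ ps, p.1 ≠ c) :
    pvGetE (ps.foldl (fun x p => x.set p.1 p.2) x) c = pvGetE x c := by
  induction ps generalizing x with
  | nil => rfl
  | cons p ps IH =>
    rw [List.foldl_cons, IH _ (fun q hq => h q (by simp [hq])), pv_getE_set,
        if_neg (by have := h p (by simp); tauto)]

theorem pv_foldset_char (ps : List (Nat × Int)) (x : List Int) (c : Nat)
    (hnd : (ps.map Prod.fst).Nodup) (hlt : ∀ p ∈ ps, p.1 < x.length) :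
    pvGetE (ps.foldl (fun x p => x.set p.1 p.2) x) c =
      (match ps.find? (fun p => p.1 == c) with
       | some p => p.2
       | none => pvGetE x c) := by
  induction ps generalizing x with
  | nil => rfl
  | cons p ps IH =>
    rw [List.foldl_cons]
    by_cases hp : p.1 = c
    · rw [List.find?_cons_of_pos (h := by simpa using hp)]
      have hnotin : ∀ q ∈ ps, q.1 ≠ c := by
        intro q hq
        simp only [List.map_cons, List.nodup_cons] at hnd
        intro hqc
        apply hnd.1
        have : q.1 ∈ List.map Prod.fst ps := List.mem_map_of_mem hq
        rwa [hqc, ← hp] at this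
      rw [pv_foldset_untouched _ _ _ hnotin, pv_getE_set,
          if_pos ⟨hp.symm, hlt p (by simp)⟩]
    · rw [List.find?_cons_of_neg (h := by simpa using hp)]
      rw [IH _ (by simp only [List.map_cons, List.nodup_cons] at hnd; exact hnd.2)
            (fun q hq => by rw [List.length_set]; exact hlt q (by simp [hq]))]
      cases hf : ps.find? (fun q => q.1 == c) with
      | some q => rfl
      | none => simp only []; rw [pv_getE_set, if_neg (by tauto)]

-- ---- pvXInit characterisation ----
theorem pv_zip_map_fst (free : List Nat) : ∀ vals : List Int,
    (free.zip vals).map Prod.fst = free.take vals.length := by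
  induction free with
  | nil => intro vals; simp
  | cons c free IH =>
    intro vals
    cases vals with
    | nil => simp
    | cons v vals => simp [IH vals]

theorem pv_xinit_len (m : Nat) (free : List Nat) (vals : List Int) :
    (pvXInit m free vals).length = m := by
  unfold pvXInit; rw [pv_foldset_len]; simp

theorem pv_xinit_nil (m : Nat) (free : List Nat) :
    pvXInit m free [] = List.replicate m 0 := by
  simp [pvXInit]

theorem pv_find_zip_none (free : List Nat) (vals : List Int) (c : Nat) (hc : c ∉ free.take vals.length) :
    (free.zip vals).find? (fun p => p.1 == c) = none := by
  rw [List.find?_eq_none]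
  intro p hp
  have h1 : p.1 ∈ (free.zip vals).map Prod.fst := List.mem_map_of_mem hp
  rw [pv_zip_map_fst] at h1
  simp only [beq_iff_eq]
  intro he; exact hc (he ▸ h1)

theorem pv_nodup_take_not_mem (free : List Nat) (hnd : free.Nodup) (j L : Nat)
    (hL : L ≤ j) (hj : j < free.length) : free[j]'hj ∉ free.take L := by
  intro hmem
  have hsplit : free = free.take L ++ free.drop L := (List.take_append_drop L free).symm
  have hnd2 := hsplit ▸ hnd
  have hdisj := List.disjoint_of_nodup_append hnd2
  apply hdisj hmem
  have hjL : j - L < (free.drop L).length := by simp; omega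
  have : (free.drop L)[j - L]'hjL = free[j]'hj := by
    rw [List.getElem_drop]; congr 1; omega
  rw [← this]
  exact List.getElem_mem hjL

theorem pv_xinit_getE_pos (m : Nat) (free : List Nat) (vals : List Int) (j : Nat)
    (hnd : free.Nodup) (hlt : ∀ c ∈ free, c < m) (hj : vals.length ≤ j) (hjf : j < free.length) :
    pvGetE (pvXInit m free vals) (free.getD j 0) = 0 := by
  unfold pvXInit
  rw [pv_foldset_char _ _ _
        (by rw [pv_zip_map_fst]; exact hnd.sublist (List.take_sublist _ _))
        (fun p hp => by
          have h1 : p.1 ∈ (free.zip vals).map Prod.fst := List.mem_map_of_mem hp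
          rw [pv_zip_map_fst] at h1
          have h2 : p.1 ∈ free := List.mem_of_mem_take h1
          simpa using hlt _ h2),
      pv_find_zip_none _ _ _ (by rw [List.getD_eq_getElem _ _ hjf]; exact pv_nodup_take_not_mem free hnd j vals.length hj hjf)]
  exact pv_getE_replicate _ _

theorem pv_xinit_zeros (m f : Nat) (free : List Nat) (hnd : free.Nodup)
    (hlt : ∀ c ∈ free, c < m) :
    pvXInit m free (List.replicate f 0) = List.replicate m 0 := by
  apply pv_ext_getE _ _ (by simp [pv_xinit_len])
  intro c
  unfold pvXInit
  rw [pv_foldset_char _ _ _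
        (by rw [pv_zip_map_fst]; exact hnd.sublist (List.take_sublist _ _))
        (fun p hp => by
          have h1 := (List.of_mem_zip hp).1
          simpa using hlt _ h1)]
  cases hf : (free.zip (List.replicate f (0:Int))).find? (fun p => p.1 == c) with
  | none => rfl
  | some p =>
    have h2 := (List.of_mem_zip (List.mem_of_find?_eq_some hf)).2
    have : p.2 = 0 := by simpa using List.eq_of_mem_replicate h2
    simp [this, pv_getE_replicate]

theorem pv_zip_append_last (free : List Nat) : ∀ (vals : List Int) (b : Int),
    vals.length < free.length →
    free.zip (vals ++ [b]) = free.zip vals ++ [(free.getD vals.length 0, b)] := by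
  induction free with
  | nil => intro vals b h; simp at h
  | cons c free IH =>
    intro vals b h
    cases vals with
    | nil => simp
    | cons v vals =>
      simp only [List.cons_append, List.zip_cons_cons, List.length_cons, List.getD_cons_succ]
      rw [IH vals b (by simpa using h)]

theorem pv_xinit_append (m : Nat) (free : List Nat) (vals : List Int) (b : Int)
    (h : vals.length < free.length) :
    pvXInit m free (vals ++ [b]) = (pvXInit m free vals).set (free.getD vals.length 0) b := by
  unfold pvXInit
  rw [pv_zip_append_last free vals b h, List.foldl_append]
  rfl

theorem pv_find_zip_getD (free : List Nat) : ∀ (vals : List Int) (k : Nat),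
    free.Nodup → (hk : k < free.length) → k < vals.length →
    (free.zip vals).find? (fun p => p.1 == free.getD k 0)
      = some (free.getD k 0, vals.getD k 0) := by
  induction free with
  | nil => intro vals k _ hk; simp at hk
  | cons c free IH =>
    intro vals k hnd hk hkv
    cases vals with
    | nil => simp at hkv
    | cons v vals =>
      cases k with
      | zero => simp
      | succ k =>
        simp only [List.getD_cons_succ, List.zip_cons_cons]
        rw [List.find?_cons_of_neg (h := by
          simp only [beq_iff_eq]
          intro he
          have hnd1 := (List.nodup_cons.mp hnd).1
          apply hnd1
          rw [he, List.getD_eq_getElem _ _ (by simpa using hk)]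
          exact List.getElem_mem _)]
        exact IH vals k (List.nodup_cons.mp hnd).2 (by simpa using hk) (by simpa using hkv)

theorem pv_xinit_getE_at (m : Nat) (free : List Nat) (vals : List Int) (k : Nat)
    (hnd : free.Nodup) (hlt : ∀ c ∈ free, c < m) (hk : k < free.length) (hkv : k < vals.length) :
    pvGetE (pvXInit m free vals) (free.getD k 0) = vals.getD k 0 := by
  unfold pvXInit
  rw [pv_foldset_char _ _ _
        (by rw [pv_zip_map_fst]; exact hnd.sublist (List.take_sublist _ _))
        (fun p hp => by
          have h1 := (List.of_mem_zip hp).1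
          simpa using hlt _ h1),
      pv_find_zip_getD free vals k hnd hk hkv]

theorem pv_xinit_getE_notmem (m : Nat) (free : List Nat) (vals : List Int) (c : Nat)
    (hnd : free.Nodup) (hc : c ∉ free) :
    pvGetE (pvXInit m free vals) c = 0 := by
  unfold pvXInit
  rw [pv_foldset_untouched _ _ _
        (fun p hp => by
          have h1 := (List.of_mem_zip hp).1
          intro he; exact hc (he ▸ h1))]
  exact pv_getE_replicate _ _

theorem pv_xinit_unit (m : Nat) (free : List Nat) (j : Nat)
    (hnd : free.Nodup) (hlt : ∀ c ∈ free, c < m) (hj : j < free.length) :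
    pvXInit m free ((List.range free.length).map (fun i => if i = j then (1:Int) else 0))
      = (List.replicate m 0).set (free.getD j 0) 1 := by
  have hjm : free.getD j 0 < m := by
    rw [List.getD_eq_getElem _ _ hj]; exact hlt _ (List.getElem_mem hj)
  apply pv_ext_getE _ _ (by simp [pv_xinit_len])
  intro c
  have hrhs : pvGetE ((List.replicate m 0).set (free.getD j 0) 1) c
      = if c = free.getD j 0 then (1:Int) else 0 := by
    rw [pv_getE_set]
    by_cases hc : c = free.getD j 0
    · rw [if_pos ⟨hc, by simpa using hjm⟩, if_pos hc]
    · rw [if_neg (by tauto), if_neg hc, pv_getE_replicate]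
  rw [hrhs]
  by_cases hc : c ∈ free
  · obtain ⟨k, hk, hck⟩ := List.mem_iff_getElem.mp hc
    have hck' : free.getD k 0 = c := by rw [List.getD_eq_getElem _ _ hk, hck]
    rw [← hck', pv_xinit_getE_at m free _ k hnd hlt hk (by simpa using hk)]
    have hval : ((List.range free.length).map (fun i => if i = j then (1:Int) else 0)).getD k 0
        = if k = j then (1:Int) else 0 := by
      rw [List.getD_eq_getElem _ _ (by simpa using hk)]
      simp
    rw [hval]
    by_cases hkj : k = j
    · subst hkj; rw [if_pos rfl, if_pos rfl]
    · rw [if_neg hkj, if_neg (by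
        rw [List.getD_eq_getElem _ _ hk, List.getD_eq_getElem _ _ hj]
        intro he
        exact hkj (hnd.getElem_inj_iff.mp he))]
  · rw [pv_xinit_getE_notmem m free _ c hnd hc,
        if_neg (by
          intro he
          apply hc
          rw [he, List.getD_eq_getElem _ _ hj]
          exact List.getElem_mem hj)]

theorem pv_set_one (m : Nat) (x : List Int) (c : Nat) (hx : x.length = m) (hcm : c < m)
    (h0 : pvGetE x c = 0) :
    x.set c 1 = pvZipXor x ((List.replicate m 0).set c 1) := by
  apply pv_ext_getE _ _ (by simp [pv_zip_len, hx])
  intro j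
  rw [pv_getE_zip _ _ (by simp [hx]), pv_getE_set, pv_getE_set]
  by_cases hj : j = c
  · subst hj
    rw [if_pos ⟨rfl, by omega⟩, if_pos ⟨rfl, by simpa using hcm⟩, h0]
    rfl
  · rw [if_neg (by tauto), if_neg (by tauto), pv_getE_replicate]
    exact (PySem.Int.bxor_zero _).symm

-- ---- pvFree ----
theorem pv_free_nodup (m : Nat) (piv : List Int) : (pvFree m piv).Nodup := by
  unfold pvFree
  exact (List.nodup_range).filter _

theorem pv_free_lt (m : Nat) (piv : List Int) : ∀ c ∈ pvFree m piv, c < m := by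
  intro c hc
  unfold pvFree at hc
  have := (List.mem_filter.mp hc).1
  simpa using this

-- ---- pivot invariant of the elimination ----
theorem pv_elimstep_piv (n m : Nat) (st : List (List Int) × List Int × Nat × List Int)
    (col : Nat) (hcol : col < m)
    (h : st.2.2.2.length = n ∧ ∀ p ∈ st.2.2.2, p = -1 ∨ (0 ≤ p ∧ p < (m:Int))) :
    (pvElimStep n m st col).2.2.2.length = n ∧
      ∀ p ∈ (pvElimStep n m st col).2.2.2, p = -1 ∨ (0 ≤ p ∧ p < (m:Int)) := by
  obtain ⟨M, t, row, piv⟩ := st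
  unfold pvElimStep
  simp only []
  split
  · simpa using h
  · constructor
    · simpa using h.1
    · intro q hq
      rcases List.mem_or_eq_of_mem_set hq with hq' | hq'
      · exact h.2 q hq'
      · right
        refine ⟨?_, ?_⟩
        · rw [hq']; positivity
        · rw [hq']; exact_mod_cast hcol

theorem pv_elimfold_piv (n m : Nat) (L : List Nat)
    (st : List (List Int) × List Int × Nat × List Int)
    (hL : ∀ c ∈ L, c < m)
    (h : st.2.2.2.length = n ∧ ∀ p ∈ st.2.2.2, p = -1 ∨ (0 ≤ p ∧ p < (m:Int))) :
    ((L.foldl (pvElimStep n m) st)).2.2.2.length = n ∧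
      ∀ p ∈ ((L.foldl (pvElimStep n m) st)).2.2.2, p = -1 ∨ (0 ≤ p ∧ p < (m:Int)) := by
  induction L generalizing st with
  | nil => exact h
  | cons c L IH =>
    exact IH _ (fun c' hc' => hL c' (by simp [hc']))
      (pv_elimstep_piv n m st c (hL c (by simp)) h)

theorem pv_gauss_piv (n m : Nat) (A0 : List (List Int)) (t0 : List Int) :
    (pvGauss n m A0 t0).2.2.2.length = n ∧
      ∀ p ∈ (pvGauss n m A0 t0).2.2.2, p = -1 ∨ (0 ≤ p ∧ p < (m:Int)) := by
  unfold pvGauss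
  apply pv_elimfold_piv
  · intro c hc; simpa using hc
  · simp

-- ---- back substitution: A's loop vs Source B's loop ----
theorem pv_bstep_len (m : Nat) (M : List (List Int)) (piv rhs x : List Int) (r : Nat) :
    (pvBStep m M piv rhs x r).length = x.length := by
  simp only [pvBStep]
  split <;> simp

theorem pv_afold_none (m : Nat) (M : List (List Int)) (t piv : List Int) (L : List Nat) :
    L.foldl (pvAStep m M t piv) none = none := by
  induction L with
  | nil => rfl
  | cons r L IH => exact IH

theorem pv_afold_break (m : Nat) (M : List (List Int)) (t piv : List Int) (L : List Nat)
    (h : ∃ r ∈ L, pvGetE piv r = -1 ∧ pvGetE t r ≠ 0) :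
    ∀ x, L.foldl (pvAStep m M t piv) (some x) = none := by
  induction L with
  | nil => simp at h
  | cons r0 L IH =>
    intro x
    rw [List.foldl_cons]
    obtain ⟨r, hr, hc1, hc2⟩ := h
    rcases List.mem_cons.mp hr with he | hmem
    · subst he
      have : pvAStep m M t piv (some x) r = none := by
        simp only [pvAStep]
        rw [if_pos (by simpa using hc1), if_pos (by simpa using hc2)]
      rw [this, pv_afold_none]
    · cases hs : pvAStep m M t piv (some x) r0 with
      | none => rw [pv_afold_none]
      | some x' => exact IH ⟨r, hmem, hc1, hc2⟩ x'

theorem pv_afold_ok (m : Nat) (M : List (List Int)) (t piv : List Int) (L : List Nat)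
    (h : ∀ r ∈ L, pvGetE piv r = -1 → pvGetE t r = 0) :
    ∀ x, L.foldl (pvAStep m M t piv) (some x)
      = some (L.foldl (pvBStep m M piv t) x) := by
  induction L with
  | nil => intro x; rfl
  | cons r L IH =>
    intro x
    rw [List.foldl_cons, List.foldl_cons]
    have hstep : pvAStep m M t piv (some x) r = some (pvBStep m M piv t x r) := by
      simp only [pvAStep, pvBStep]
      by_cases hpc : pvGetE piv r = -1
      · have ht : pvGetE t r = 0 := h r (by simp) hpc
        simp [hpc, ht]
      · rw [if_neg (by simpa using hpc), if_neg (by simpa using hpc)]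
    rw [hstep]
    exact IH (fun r' hr' => h r' (by simp [hr'])) _

-- ---- linearity of Source B's back substitution ----
theorem pv_lin_inner (cols : List Nat) (rowv x y : List Int) (hxy : x.length = y.length) :
    ∀ s1 s2 : Int,
    cols.foldl (fun s c => PySem.Int.bxor s
        (PySem.Int.band (pvGetE rowv c) (pvGetE (pvZipXor x y) c))) (PySem.Int.bxor s1 s2)
      = PySem.Int.bxor
          (cols.foldl (fun s c => PySem.Int.bxor s
              (PySem.Int.band (pvGetE rowv c) (pvGetE x c))) s1)
          (cols.foldl (fun s c => PySem.Int.bxor s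
              (PySem.Int.band (pvGetE rowv c) (pvGetE y c))) s2) := by
  induction cols with
  | nil => intro s1 s2; rfl
  | cons c cols IH =>
    intro s1 s2
    simp only [List.foldl_cons]
    rw [pv_getE_zip x y hxy c, pv_band_bxor, pv_bxor4]
    exact IH _ _

theorem pv_lin (n m : Nat) (M : List (List Int)) (piv rhs : List Int) (L : List Nat)
    (hpiv : ∀ p ∈ piv, p = -1 ∨ (0 ≤ p ∧ p < (m:Int)))
    (hL : ∀ r ∈ L, r < piv.length) :
    ∀ x y : List Int, x.length = m → y.length = m →
    L.foldl (pvBStep m M piv rhs) (pvZipXor x y)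
      = pvZipXor (L.foldl (pvBStep m M piv rhs) x)
                 (L.foldl (pvBStep m M piv (List.replicate n 0)) y) := by
  induction L with
  | nil => intro x y hx hy; rfl
  | cons r L IH =>
    intro x y hx hy
    simp only [List.foldl_cons]
    have hr := hL r (by simp)
    have hLA : ∀ r' ∈ L, r' < piv.length := fun r' hr' => hL r' (by simp [hr'])
    by_cases hpc : pvGetE piv r = -1
    · have e1 : pvBStep m M piv rhs (pvZipXor x y) r = pvZipXor x y := by
        simp only [pvBStep]; rw [if_pos (by simpa using hpc)]
      have e2 : pvBStep m M piv rhs x r = x := by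
        simp only [pvBStep]; rw [if_pos (by simpa using hpc)]
      have e3 : pvBStep m M piv (List.replicate n 0) y r = y := by
        simp only [pvBStep]; rw [if_pos (by simpa using hpc)]
      rw [e1, e2, e3]
      exact IH hLA x y hx hy
    · have hmem : pvGetE piv r ∈ piv := by
        unfold pvGetE
        rw [List.getD_eq_getElem _ _ hr]
        exact List.getElem_mem hr
      have h0 : 0 ≤ pvGetE piv r ∧ pvGetE piv r < (m:Int) := by
        rcases hpiv _ hmem with h' | h'
        · exact absurd h' hpc
        · exact h'
      have hlt : (pvGetE piv r).toNat < m := by omega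
      have hxy' : x.length = y.length := by omega
      have hzstart : pvGetE rhs r
          = PySem.Int.bxor (pvGetE rhs r) (pvGetE (List.replicate n (0:Int)) r) := by
        rw [pv_getE_replicate]
        exact (PySem.Int.bxor_zero _).symm
      have e1 : pvBStep m M piv rhs (pvZipXor x y) r
          = pvZipXor (pvBStep m M piv rhs x r) (pvBStep m M piv (List.replicate n 0) y r) := by
        simp only [pvBStep]
        rw [if_neg (by simpa using hpc), if_neg (by simpa using hpc), if_neg (by simpa using hpc)]
        rw [hzstart, pv_lin_inner _ _ x y hxy', pv_set_zip x y hxy', ← hzstart]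
      rw [e1]
      exact IH hLA _ _ (by rw [pv_bstep_len]; exact hx) (by rw [pv_bstep_len]; exact hy)

-- ---- big-endian bit lists and itertools.product ----
def pvBits (f mask : Nat) : List Int :=
  (List.range f).map (fun k => (((mask >>> (f - 1 - k)) &&& 1 : Nat) : Int))

theorem pv_bits_len (f mask : Nat) : (pvBits f mask).length = f := by
  simp [pvBits]

theorem pv_bits_bits (f mask : Nat) : ∀ b ∈ pvBits f mask, b = 0 ∨ b = 1 := by
  intro b hb
  obtain ⟨k, _, hk⟩ := List.mem_map.mp hb
  have h1 : (mask >>> (f - 1 - k)) &&& 1 = (mask >>> (f - 1 - k)) % 2 := Nat.and_one_is_mod _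
  rcases Nat.mod_two_eq_zero_or_one (mask >>> (f - 1 - k)) with e | e <;>
    [left; right] <;> (rw [← hk, h1, e]; rfl)

theorem pv_bits_succ_lo (w mask : Nat) (h : mask < 2 ^ w) :
    pvBits (w + 1) mask = 0 :: pvBits w mask := by
  unfold pvBits
  rw [List.range_succ_eq_map, List.map_cons, List.map_map]
  congr 1
  · have : mask >>> w = 0 := by
      rw [Nat.shiftRight_eq_div_pow]
      exact Nat.div_eq_of_lt h
    simp [this]
  · apply List.map_congr_left
    intro k _
    simp only [Function.comp]
    have he : w + 1 - 1 - Nat.succ k = w - 1 - k := by omega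
    rw [he]
theorem pv_shift_add (w j mask : Nat) (hj : j < w) :
    ((2 ^ w + mask) >>> j) &&& 1 = (mask >>> j) &&& 1 := by
  rw [Nat.shiftRight_eq_div_pow, Nat.shiftRight_eq_div_pow, Nat.and_one_is_mod, Nat.and_one_is_mod]
  have hsplit : 2 ^ w = 2 ^ (w - j) * 2 ^ j := by
    rw [← pow_add]; congr 1; omega
  have hdiv : (2 ^ w + mask) / 2 ^ j = 2 ^ (w - j) + mask / 2 ^ j := by
    rw [hsplit, Nat.add_comm (2 ^ (w - j) * 2 ^ j) mask, Nat.add_mul_div_right _ _ (by positivity : 0 < 2 ^ j)]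
    omega
  rw [hdiv]
  have heven : 2 ^ (w - j) % 2 = 0 := by
    have : w - j = (w - j - 1) + 1 := by omega
    rw [this, pow_succ]
    omega
  omega

theorem pv_bits_succ_hi (w mask : Nat) (h : mask < 2 ^ w) :
    pvBits (w + 1) (2 ^ w + mask) = 1 :: pvBits w mask := by
  unfold pvBits
  rw [List.range_succ_eq_map, List.map_cons, List.map_map]
  congr 1
  · have h1 : (2 ^ w + mask) >>> w = 1 := by
      rw [Nat.shiftRight_eq_div_pow, Nat.add_comm, Nat.add_div_right _ (by positivity : 0 < 2 ^ w),
          Nat.div_eq_of_lt h]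
    simp [h1]
  · apply List.map_congr_left
    intro k hk
    simp only [Function.comp]
    have hkw : k < w := List.mem_range.mp hk
    have he : w + 1 - 1 - (k + 1) = w - 1 - k := by omega
    rw [he]
    have hj : w - 1 - k < w := by omega
    rw [pv_shift_add w _ mask hj]

theorem pv_bitseq : ∀ w : Nat, (List.range (2 ^ w)).map (pvBits w) = pvProd w := by
  intro w
  induction w with
  | zero => simp [pvProd, pvBits]
  | succ w IH =>
    have h2 : 2 ^ (w + 1) = 2 ^ w + 2 ^ w := by omega
    rw [h2, List.range_add, List.map_append, List.map_map]
    have hlo : (List.range (2 ^ w)).map (pvBits (w + 1))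
        = ((List.range (2 ^ w)).map (pvBits w)).map (fun t => 0 :: t) := by
      rw [List.map_map]
      apply List.map_congr_left
      intro mask hm
      exact pv_bits_succ_lo w mask (List.mem_range.mp hm)
    have hhi : (List.range (2 ^ w)).map (pvBits (w + 1) ∘ (fun x => 2 ^ w + x))
        = ((List.range (2 ^ w)).map (pvBits w)).map (fun t => 1 :: t) := by
      rw [List.map_map]
      apply List.map_congr_left
      intro mask hm
      exact pv_bits_succ_hi w mask (List.mem_range.mp hm)
    rw [hlo, hhi, IH]
    rfl

-- ---- the combination fold computes Source B's back substitution ----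
def pvBasisL (n m : Nat) (M : List (List Int)) (piv : List Int) (free : List Nat) : List (List Int) :=
  (List.range free.length).map (fun k =>
    pvBLoop n m M piv (List.replicate n 0)
      (pvXInit m free ((List.range free.length).map (fun i => if i = k then (1:Int) else 0))))

theorem pv_basis_getD (n m : Nat) (M : List (List Int)) (piv : List Int) (free : List Nat)
    (k : Nat) (hk : k < free.length) :
    (pvBasisL n m M piv free).getD k []
      = pvBLoop n m M piv (List.replicate n 0)
          (pvXInit m free ((List.range free.length).map (fun i => if i = k then (1:Int) else 0))) := by
  unfold pvBasisL
  rw [List.getD_eq_getElem _ _ (by simpa using hk)]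
  simp

theorem pv_main (n m : Nat) (M : List (List Int)) (t piv : List Int) (free : List Nat)
    (hpiv : ∀ p ∈ piv, p = -1 ∨ (0 ≤ p ∧ p < (m:Int)))
    (hpl : piv.length = n)
    (hnd : free.Nodup) (hlt : ∀ c ∈ free, c < m) :
    ∀ tu : List Int, (∀ b ∈ tu, b = 0 ∨ b = 1) → tu.length ≤ free.length →
    pvBLoop n m M piv t (pvXInit m free tu)
      = (List.range tu.length).foldl
          (fun x k => if tu.getD k 0 == 1
            then pvZipXor x ((pvBasisL n m M piv free).getD k [])
            else x)
          (pvBLoop n m M piv t (pvXInit m free (List.replicate free.length 0))) := by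
  intro tu
  induction tu using List.reverseRecOn with
  | nil =>
    intro _ _
    rw [pv_xinit_nil, pv_xinit_zeros m free.length free hnd hlt]
    rfl
  | append_singleton tu' b IH =>
    intro hb hlen
    have hj : tu'.length < free.length := by
      rw [List.length_append, List.length_singleton] at hlen
      omega
    have hb' : ∀ x ∈ tu', x = 0 ∨ x = 1 := fun x hx => hb x (by simp [hx])
    have hbb : b = 0 ∨ b = 1 := hb b (by simp)
    have hjm : free.getD tu'.length 0 < m := by
      rw [List.getD_eq_getElem _ _ hj]
      exact hlt _ (List.getElem_mem hj)
    have hgl : (tu' ++ [b]).length = tu'.length + 1 := by simp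
    rw [hgl, List.range_succ, List.foldl_append, List.foldl_cons, List.foldl_nil]
    have hcong : ∀ x0 : List Int,
        (List.range tu'.length).foldl
          (fun x k => if (tu' ++ [b]).getD k 0 == 1
            then pvZipXor x ((pvBasisL n m M piv free).getD k []) else x) x0
        = (List.range tu'.length).foldl
          (fun x k => if tu'.getD k 0 == 1
            then pvZipXor x ((pvBasisL n m M piv free).getD k []) else x) x0 := by
      intro x0
      apply pv_foldl_congr
      intro xa k hk
      rw [List.getD_append _ _ _ _ (List.mem_range.mp hk)]
    rw [hcong]
    have hgetlast : (tu' ++ [b]).getD tu'.length 0 = b := by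
      rw [List.getD_append_right _ _ _ _ (le_refl _), Nat.sub_self]
      rfl
    rw [hgetlast, pv_xinit_append m free tu' b hj]
    rcases hbb with h0 | h1
    · subst h0
      rw [pv_set_self _ _ _ (pv_xinit_getE_pos m free tu' tu'.length hnd hlt (le_refl _) hj)]
      rw [IH hb' (by omega)]
      rw [if_neg (by simp)]
    · subst h1
      rw [pv_set_one m (pvXInit m free tu') (free.getD tu'.length 0) (pv_xinit_len m free tu') hjm
            (pv_xinit_getE_pos m free tu' tu'.length hnd hlt (le_refl _) hj)]
      rw [← pv_xinit_unit m free tu'.length hnd hlt hj]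
      unfold pvBLoop
      rw [pv_lin n m M piv t ((List.range n).reverse) hpiv
            (fun r hr => by rw [hpl]; exact List.mem_range.mp (List.mem_reverse.mp hr))
            _ _ (pv_xinit_len m free tu') (pv_xinit_len m free _)]
      have hIH := IH hb' (by omega)
      unfold pvBLoop at hIH
      rw [hIH]
      rw [if_pos (by simp)]
      rw [pv_basis_getD n m M piv free tu'.length hj]
      unfold pvBLoop
      rfl

theorem pv_cast_beq_one (a : Nat) : (((a : Int)) == (1 : Int)) = (a == 1) := by
  by_cases h : a = 1 <;> simp [h]

theorem pv_any_iff (n : Nat) (t piv : List Int) :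
    ((List.range n).any (fun r => pvGetE piv r == -1 && !(pvGetE t r == 0)) = true)
      ↔ ∃ r, r < n ∧ pvGetE piv r = -1 ∧ pvGetE t r ≠ 0 := by
  rw [List.any_eq_true]
  constructor
  · rintro ⟨r, hr, hc⟩
    simp only [Bool.and_eq_true, beq_iff_eq, Bool.not_eq_true', beq_eq_false_iff_ne] at hc
    exact ⟨r, List.mem_range.mp hr, hc.1, hc.2⟩
  · rintro ⟨r, hr, h1, h2⟩
    refine ⟨r, List.mem_range.mpr hr, ?_⟩
    simp only [Bool.and_eq_true, beq_iff_eq, Bool.not_eq_true', beq_eq_false_iff_ne]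
    exact ⟨h1, h2⟩

-- ===== VERDICT (by name: the statement is the Claim_ definition above) =====
theorem solve_machine_spec : Claim_equal_solve_machine := by
  unfold Claim_equal_solve_machine
  intro target buttons _hdom _hpre
  unfold Spec_solve_machine
  unfold solve_machine solve_machine_alt
  rcases hg : pvGauss target.length buttons.length
      (pvBuild target.length buttons.length buttons) target with ⟨M, t, rw0, piv⟩
  have hinv := pv_gauss_piv target.length buttons.length
      (pvBuild target.length buttons.length buttons) target
  rw [hg] at hinv
  simp only [hg]
  have hpl : piv.length = target.length := hinv.1
  have hpiv : ∀ p ∈ piv, p = -1 ∨ (0 ≤ p ∧ p < (buttons.length : Int)) := hinv.2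
  have hnd := pv_free_nodup buttons.length piv
  have hlt := pv_free_lt buttons.length piv
  by_cases hcons : ∃ r, r < target.length ∧ pvGetE piv r = -1 ∧ pvGetE t r ≠ 0
  · -- inconsistent: both sides are none
    rw [if_pos ((pv_any_iff target.length t piv).mpr hcons)]
    obtain ⟨r, hr, h1, h2⟩ := hcons
    have hnone : ∀ tu : List Int,
        pvBackA target.length buttons.length M t piv
          (pvXInit buttons.length (pvFree buttons.length piv) tu) = none := by
      intro tu
      exact pv_afold_break _ _ _ _ _
        ⟨r, List.mem_reverse.mpr (List.mem_range.mpr hr), h1, h2⟩ _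
    rw [pv_foldl_congr _ _ (fun (b : Option Int) (_ : List Int) => b) _
          (fun b tu _ => by rw [hnone tu]), pv_foldl_id]
  · rw [if_neg (by
      intro hc
      exact hcons ((pv_any_iff target.length t piv).mp hc))]
    have hok : ∀ r ∈ (List.range target.length).reverse,
        pvGetE piv r = -1 → pvGetE t r = 0 := by
      intro r hr h1
      by_contra h2
      exact hcons ⟨r, List.mem_range.mp (List.mem_reverse.mp hr), h1, h2⟩
    have hstepA : ∀ (b : Option Int) (tu : List Int),
        (match pvBackA target.length buttons.length M t piv
            (pvXInit buttons.length (pvFree buttons.length piv) tu) with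
         | none => b
         | some x => pvMin b (x.foldl (·+·) 0))
        = pvMin b ((pvBLoop target.length buttons.length M piv t
            (pvXInit buttons.length (pvFree buttons.length piv) tu)).foldl (·+·) 0) := by
      intro b tu
      unfold pvBackA pvBLoop
      rw [pv_afold_ok _ _ _ _ _ hok]
    rw [pv_foldl_congr _ _ _ _ (fun b tu _ => hstepA b tu)]
    rw [← pv_bitseq (pvFree buttons.length piv).length, List.foldl_map]
    have hsl : 1 <<< (pvFree buttons.length piv).length
        = 2 ^ (pvFree buttons.length piv).length := by
      rw [Nat.shiftLeft_eq, one_mul]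
    rw [hsl]
    apply pv_foldl_congr
    intro b mask _
    have hvec :
        pvBLoop target.length buttons.length M piv t
          (pvXInit buttons.length (pvFree buttons.length piv)
            (pvBits (pvFree buttons.length piv).length mask))
        = (List.range (pvFree buttons.length piv).length).foldl
            (fun x k => if (mask >>> ((pvFree buttons.length piv).length - 1 - k)) &&& 1 == 1
              then pvZipXor x ((pvBasisL target.length buttons.length M piv
                  (pvFree buttons.length piv)).getD k [])
              else x)
            (pvBLoop target.length buttons.length M piv t
              (pvXInit buttons.length (pvFree buttons.length piv)
                (List.replicate (pvFree buttons.length piv).length 0))) := by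
      rw [pv_main target.length buttons.length M t piv (pvFree buttons.length piv)
            hpiv hpl hnd hlt _
            (pv_bits_bits _ _) (by rw [pv_bits_len])]
      rw [pv_bits_len]
      apply pv_foldl_congr
      intro x k hk
      have hkf : k < (pvFree buttons.length piv).length := List.mem_range.mp hk
      have hgd : (pvBits (pvFree buttons.length piv).length mask).getD k 0
          = (((mask >>> ((pvFree buttons.length piv).length - 1 - k)) &&& 1 : Nat) : Int) := by
        unfold pvBits
        rw [List.getD_eq_getElem _ _ (by simpa using hkf)]
        simp
      rw [hgd, pv_cast_beq_one]
    rw [hvec]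
    unfold pvBackSub pvBasisL
    rfl
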